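-- pv_equiv track=rewrite | github.com/Arsen1302/Code-copy-detector | TestData/solutions/problem_769_4_1.py | solution_769_4_1
-- ===== SOURCE A (Python) =====
-- from typing import List
--
-- def solution_769_4_1(nums: List[int]) -> int:
--     # try to make alternate less than left and right..
--     def solution_769_4_2(start, nums): # returns cost
--         cost = 0
--         for i in range(start, len(nums), 2):
--
--             # 1. make me smaller than LEFT adjacent
--             if i > 0 and nums[i-1] <= nums[i]:
--                 change = nums[i] - nums[i-1] + 1 # +1 as strict < not <=
--                 cost += change
--                 nums[i] -= change
--
--             # 2. do same for right neighbour
--             if i < len(nums)-1 and nums[i+1] <= nums[i]: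
--                 change = nums[i] - nums[i+1] + 1
--                 cost += change
--                 nums[i] -= change
--
--         return cost
--
--     return min(solution_769_4_2(0, nums[:]), solution_769_4_2(1,nums[:]))
-- ===== SOURCE B (Python) =====
-- from typing import List
--
-- def solution_769_4_1(nums: List[int]) -> int:
--     # Single index-free pass over (value, left, right) triples built by zipping
--     # shifted copies of the list; two accumulators for the two parities are
--     # swapped each step, so both parity totals are computed in one traversal.
--     cur, other = 0, 0
--     lefts = [None] + nums[:-1]
--     rights = nums[1:] + [None]
--     for x, l, r in zip(nums, lefts, rights):
--         cand = [v for v in (l, r) if v is not None]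
--         c = max(0, x - min(cand) + 1) if cand else 0
--         cur, other = other, cur + c
--     return min(cur, other)
-- ===== Notes on version B (the rewrite author's own statement) =====
-- stated objective: alternative
-- what changed: B replaces A's two parity passes over mutated list copies by a single index-free pass over (value,left,right) triples obtained by zipping shifted copies of the list, maintaining both parity totals at once in two accumulators swapped each step.
import Mathlib
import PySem

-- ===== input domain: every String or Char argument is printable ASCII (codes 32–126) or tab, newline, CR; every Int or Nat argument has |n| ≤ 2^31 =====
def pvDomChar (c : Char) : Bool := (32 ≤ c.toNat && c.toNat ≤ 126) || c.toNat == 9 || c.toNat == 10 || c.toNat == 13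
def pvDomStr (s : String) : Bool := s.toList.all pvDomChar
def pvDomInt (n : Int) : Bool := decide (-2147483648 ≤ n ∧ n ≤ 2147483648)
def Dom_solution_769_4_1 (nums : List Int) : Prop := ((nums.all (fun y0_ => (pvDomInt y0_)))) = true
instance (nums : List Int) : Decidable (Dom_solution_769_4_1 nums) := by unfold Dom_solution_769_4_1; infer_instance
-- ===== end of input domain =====

-- B replaces A's two parity passes over mutated list copies by a single index-free pass over
-- zipped (value,left,right) triples, carrying both parity totals in two swapped accumulators.
-- Objective: alternative. (A mutates only its local copies nums[:]; neither mutates the caller's list.)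

-- ===== PORT A =====
-- one loop iteration of solution_769_4_2: state = (working list copy, cost)
def stepA (st : List Int × Int) (i : Int) : List Int × Int :=
  let ns := st.1
  let cost := st.2
  let st1 :=
    if 0 < i ∧ PySem.List.pyGetD ns (i-1) 0 ≤ PySem.List.pyGetD ns i 0 then
      (PySem.List.pySetD ns i
         (PySem.List.pyGetD ns i 0 - (PySem.List.pyGetD ns i 0 - PySem.List.pyGetD ns (i-1) 0 + 1)),
       cost + (PySem.List.pyGetD ns i 0 - PySem.List.pyGetD ns (i-1) 0 + 1))
    else (ns, cost)
  if i < (st1.1.length : Int) - 1 ∧ PySem.List.pyGetD st1.1 (i+1) 0 ≤ PySem.List.pyGetD st1.1 i 0 then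
    (PySem.List.pySetD st1.1 i
       (PySem.List.pyGetD st1.1 i 0 - (PySem.List.pyGetD st1.1 i 0 - PySem.List.pyGetD st1.1 (i+1) 0 + 1)),
     st1.2 + (PySem.List.pyGetD st1.1 i 0 - PySem.List.pyGetD st1.1 (i+1) 0 + 1))
  else st1

-- solution_769_4_2(start, nums[:]) — the copy makes the mutation local, the return is the cost
def innerA (start : Int) (nums : List Int) : Int :=
  ((PySem.List.pyRange start (nums.length : Int) 2).foldl stepA (nums, 0)).2

def solution_769_4_1 (nums : List Int) : Int :=
  min (innerA 0 nums) (innerA 1 nums)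

-- ===== PORT B =====
-- c = max(0, x - min(cand) + 1) if cand else 0, with cand = [v for v in (l, r) if v is not None]
def tripleCost (x : Int) (l r : Option Int) : Int :=
  let cand : List Int :=
    (match l with | some a => [a] | none => []) ++ (match r with | some b => [b] | none => [])
  match PySem.List.min? cand (fun y => y) with
  | none => 0
  | some m => max 0 (x - m + 1)

def solution_769_4_1_alt (nums : List Int) : Int :=
  let lefts : List (Option Int) := none :: nums.dropLast.map some
  let rights : List (Option Int) := (nums.drop 1).map some ++ [none]
  let p := (nums.zip (lefts.zip rights)).foldl
      (fun st t => (st.2, st.1 + tripleCost t.1 t.2.1 t.2.2)) ((0:Int), (0:Int))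
  min p.1 p.2

-- ===== PRECONDITION & SPEC =====
def Spec_solution_769_4_1 (nums : List Int) (out : Int) : Prop := out = solution_769_4_1_alt nums
instance (nums : List Int) (out : Int) : Decidable (Spec_solution_769_4_1 nums out) := by unfold Spec_solution_769_4_1; infer_instance

-- ===== CLAIM (what is proved, stated in full; the proofs are below) =====
def Claim_equal_solution_769_4_1 : Prop := ∀ (nums : List Int), Dom_solution_769_4_1 nums → Spec_solution_769_4_1 nums (solution_769_4_1 nums)

-- ===== LEMMAS AND PROOFS =====

-- the stateless per-index cost both programs compute
def costB (nums : List Int) (i : Int) : Int :=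
  let nbrs : List Int :=
    (if 0 < i then [PySem.List.pyGetD nums (i-1) 0] else []) ++
    (if i < (nums.length : Int) - 1 then [PySem.List.pyGetD nums (i+1) 0] else [])
  match PySem.List.min? nbrs (fun y => y) with
  | none => 0
  | some m => max 0 (PySem.List.pyGetD nums i 0 - (m - 1))

lemma pyRange_two_nil (a b : Int) (h : b ≤ a) : PySem.List.pyRange a b 2 = [] := by
  rw [PySem.List.pyRange_of_pos a b (by norm_num)]
  simp [show ¬ a < b by omega]

lemma pyRange_two_cons (a b : Int) (h : a < b) :
    PySem.List.pyRange a b 2 = a :: PySem.List.pyRange (a+2) b 2 := by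
  rw [PySem.List.pyRange_of_pos a b (by norm_num), PySem.List.pyRange_of_pos (a+2) b (by norm_num)]
  have h2 : (if a < b then ((b - a + 2 - 1) / 2).toNat else 0)
      = (if a + 2 < b then ((b - (a+2) + 2 - 1) / 2).toNat else 0) + 1 := by
    split_ifs <;> omega
  rw [h2, List.range_succ_eq_map]
  simp only [List.map_cons, List.map_map, Nat.cast_zero, mul_zero, add_zero, List.cons.injEq]
  refine ⟨trivial, ?_⟩
  apply List.map_congr_left
  intro k _
  simp [Function.comp]
  ring

lemma pyRange_two_snoc (a b : Int) (h : a ≤ b) (hp : (b - a) % 2 = 0) :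
    PySem.List.pyRange a (b+1) 2 = PySem.List.pyRange a b 2 ++ [b] := by
  rw [PySem.List.pyRange_of_pos a b (by norm_num), PySem.List.pyRange_of_pos a (b+1) (by norm_num)]
  have h2 : (if a < b + 1 then ((b + 1 - a + 2 - 1) / 2).toNat else 0)
      = (if a < b then ((b - a + 2 - 1) / 2).toNat else 0) + 1 := by
    split_ifs <;> omega
  rw [h2, List.range_succ, List.map_append]
  congr 1
  simp only [List.map_cons, List.map_nil, List.cons.injEq, and_true]
  split_ifs with hab
  · omega
  · omega

lemma pyRange_two_stay (a b : Int) (hp : (b - a) % 2 ≠ 0 ∨ b < a) :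
    PySem.List.pyRange a (b+1) 2 = PySem.List.pyRange a b 2 := by
  rw [PySem.List.pyRange_of_pos a b (by norm_num), PySem.List.pyRange_of_pos a (b+1) (by norm_num)]
  have h2 : (if a < b + 1 then ((b + 1 - a + 2 - 1) / 2).toNat else 0)
      = (if a < b then ((b - a + 2 - 1) / 2).toNat else 0) := by
    rcases hp with hp | hp <;> split_ifs <;> omega
  rw [h2]

lemma getD_setD (xs : List Int) {i : Int} (j v : Int) (hi0 : 0 ≤ i) (hi : i < (xs.length : Int))
    (hj0 : 0 ≤ j) :
    PySem.List.pyGetD (PySem.List.pySetD xs i v) j 0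
      = if j = i then v else PySem.List.pyGetD xs j 0 := by
  have h := PySem.List.pyGetD_pySetD_natCast xs i.toNat j.toNat v 0 (by omega)
  rw [Int.toNat_of_nonneg hi0, Int.toNat_of_nonneg hj0] at h
  rw [h]
  by_cases he : j = i
  · simp [he]
  · simp [he, show ¬ j.toNat = i.toNat by omega]

lemma stepA_eval (nums ns : List Int) (c a : Int) (h0 : 0 ≤ a)
    (ha : a < (nums.length : Int)) (hl : ns.length = nums.length)
    (hag : ∀ j : Int, a - 1 ≤ j → PySem.List.pyGetD ns j 0 = PySem.List.pyGetD nums j 0) :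
    (stepA (ns, c) a).2 = c + costB nums a ∧
    (stepA (ns, c) a).1.length = nums.length ∧
    (∀ j : Int, a + 1 ≤ j → PySem.List.pyGetD (stepA (ns, c) a).1 j 0 = PySem.List.pyGetD nums j 0) := by
  have hL := hag (a-1) (by omega)
  have hC := hag a (by omega)
  have hR := hag (a+1) (by omega)
  have hset1 : ∀ (xs : List Int), xs.length = nums.length → ∀ (v j : Int), 0 ≤ j → j ≠ a →
      PySem.List.pyGetD (PySem.List.pySetD xs a v) j 0 = PySem.List.pyGetD xs j 0 := by
    intro xs hx v j hj hne
    rw [getD_setD xs j v h0 (by omega) hj, if_neg hne]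
  have hset2 : ∀ (xs : List Int), xs.length = nums.length → ∀ (v : Int),
      PySem.List.pyGetD (PySem.List.pySetD xs a v) a 0 = v := by
    intro xs hx v
    rw [getD_setD xs a v h0 (by omega) h0, if_pos rfl]
  simp only [stepA]
  split_ifs with h1 h2 h3
  · -- both branches fire
    rw [PySem.List.length_pySetD, hl] at h2
    rw [hset1 ns hl _ (a+1) (by omega) (by omega), hset2 ns hl] at h2
    rw [hR] at h2
    obtain ⟨h1a, h1b⟩ := h1
    obtain ⟨h2a, h2b⟩ := h2
    rw [hL, hC] at h1b
    refine ⟨?_, ?_, ?_⟩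
    · dsimp only
      rw [hset1 ns hl _ (a+1) (by omega) (by omega), hset2 ns hl, hL, hC, hR]
      simp only [costB, if_pos h1a, if_pos h2a, List.cons_append, List.nil_append,
        PySem.List.min?_id_cons, List.foldl_cons, List.foldl_nil]
      omega
    · dsimp only
      simp [PySem.List.length_pySetD, hl]
    · intro j hj
      dsimp only
      rw [hset1 _ (by simp [PySem.List.length_pySetD, hl]) _ j (by omega) (by omega),
        hset1 ns hl _ j (by omega) (by omega)]
      exact hag j (by omega)
  · -- first fires, second not
    obtain ⟨h1a, h1b⟩ := h1
    rw [hL, hC] at h1b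
    rw [PySem.List.length_pySetD, hl] at h2
    rw [hset1 ns hl _ (a+1) (by omega) (by omega), hset2 ns hl] at h2
    rw [hR] at h2
    refine ⟨?_, ?_, ?_⟩
    · dsimp only
      rw [hL, hC]
      by_cases hg2 : a < (nums.length : Int) - 1
      · have hr2 : ¬ PySem.List.pyGetD nums (a+1) 0 ≤
            PySem.List.pyGetD nums a 0 - (PySem.List.pyGetD nums a 0 - PySem.List.pyGetD nums (a-1) 0 + 1) := by
          intro hc; exact h2 ⟨hg2, by rw [hL, hC]; exact hc⟩
        simp only [costB, if_pos h1a, if_pos hg2, List.cons_append, List.nil_append,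
          PySem.List.min?_id_cons, List.foldl_cons, List.foldl_nil]
        omega
      · simp only [costB, if_pos h1a, if_neg hg2, List.cons_append, List.nil_append,
          PySem.List.min?_id_cons, List.foldl_nil]
        omega
    · dsimp only
      simp [PySem.List.length_pySetD, hl]
    · intro j hj
      dsimp only
      rw [hset1 ns hl _ j (by omega) (by omega)]
      exact hag j (by omega)
  · -- first not, second fires
    rw [hl] at h3
    rw [hR, hC] at h3
    obtain ⟨h3a, h3b⟩ := h3
    refine ⟨?_, ?_, ?_⟩
    · dsimp only
      rw [hC, hR]
      by_cases hg1 : 0 < a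
      · have hl1 : ¬ PySem.List.pyGetD nums (a-1) 0 ≤ PySem.List.pyGetD nums a 0 := by
          intro hc; exact h1 ⟨hg1, by rw [hL, hC]; exact hc⟩
        simp only [costB, if_pos hg1, if_pos h3a, List.cons_append, List.nil_append,
          PySem.List.min?_id_cons, List.foldl_cons, List.foldl_nil]
        omega
      · simp only [costB, if_neg hg1, if_pos h3a, List.nil_append,
          PySem.List.min?_id_cons, List.foldl_nil]
        omega
    · dsimp only
      simp [PySem.List.length_pySetD, hl]
    · intro j hj
      dsimp only
      rw [hset1 ns hl _ j (by omega) (by omega)]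
      exact hag j (by omega)
  · -- neither fires
    rw [hl] at h3
    rw [hR, hC] at h3
    refine ⟨?_, hl, fun j hj => hag j (by omega)⟩
    dsimp only
    by_cases hg1 : 0 < a <;> by_cases hg2 : a < (nums.length : Int) - 1
    · have hl1 : ¬ PySem.List.pyGetD nums (a-1) 0 ≤ PySem.List.pyGetD nums a 0 := by
        intro hc; exact h1 ⟨hg1, by rw [hL, hC]; exact hc⟩
      have hr1 : ¬ PySem.List.pyGetD nums (a+1) 0 ≤ PySem.List.pyGetD nums a 0 := by
        intro hc; exact h3 ⟨hg2, hc⟩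
      simp only [costB, if_pos hg1, if_pos hg2, List.cons_append, List.nil_append,
        PySem.List.min?_id_cons, List.foldl_cons, List.foldl_nil]
      omega
    · have hl1 : ¬ PySem.List.pyGetD nums (a-1) 0 ≤ PySem.List.pyGetD nums a 0 := by
        intro hc; exact h1 ⟨hg1, by rw [hL, hC]; exact hc⟩
      simp only [costB, if_pos hg1, if_neg hg2, List.cons_append, List.nil_append,
        PySem.List.min?_id_cons, List.foldl_nil]
      omega
    · have hr1 : ¬ PySem.List.pyGetD nums (a+1) 0 ≤ PySem.List.pyGetD nums a 0 := by
        intro hc; exact h3 ⟨hg2, hc⟩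
      simp only [costB, if_neg hg1, if_pos hg2, List.nil_append,
        PySem.List.min?_id_cons, List.foldl_nil]
      omega
    · simp only [costB, if_neg hg1, if_neg hg2, List.append_nil]
      simp [PySem.List.min?]

lemma loopA (nums : List Int) : ∀ (fuel : Nat) (a : Int) (ns : List Int) (c : Int),
    0 ≤ a →
    (nums.length : Int) ≤ a + 2 * fuel →
    ns.length = nums.length →
    (∀ j : Int, a - 1 ≤ j → PySem.List.pyGetD ns j 0 = PySem.List.pyGetD nums j 0) →
    ((PySem.List.pyRange a (nums.length : Int) 2).foldl stepA (ns, c)).2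
      = c + ((PySem.List.pyRange a (nums.length : Int) 2).map (costB nums)).sum
  | 0, a, ns, c, h0, hf, hl, hag => by
      rw [pyRange_two_nil _ _ (by omega)]; simp
  | fuel+1, a, ns, c, h0, hf, hl, hag => by
      by_cases h : a < (nums.length : Int)
      · rw [pyRange_two_cons _ _ h]
        simp only [List.foldl_cons, List.map_cons, List.sum_cons]
        obtain ⟨hc, hl', hag'⟩ := stepA_eval nums ns c a h0 h hl hag
        have ih := loopA nums fuel (a+2) (stepA (ns, c) a).1 (stepA (ns, c) a).2
          (by omega) (by omega) hl' (fun j hj => hag' j (by omega))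
        rw [show stepA (ns, c) a = ((stepA (ns, c) a).1, (stepA (ns, c) a).2) from rfl, ih, hc]
        ring
      · rw [pyRange_two_nil _ _ (by omega)]; simp

lemma innerA_eq (start : Int) (nums : List Int) (h0 : 0 ≤ start) :
    innerA start nums = ((PySem.List.pyRange start (nums.length : Int) 2).map (costB nums)).sum := by
  unfold innerA
  rw [loopA nums nums.length start nums 0 h0 (by omega) rfl (fun j _ => rfl)]
  ring

-- the triple the B port sees at position i
def gTrip (nums : List Int) (i : Nat) : Int × (Option Int × Option Int) :=
  (nums.getD i 0,
   (if i = 0 then none else some (nums.getD (i-1) 0),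
    if i + 1 < nums.length then some (nums.getD (i+1) 0) else none))

lemma triples_eq (nums : List Int) :
    nums.zip (((none : Option Int) :: nums.dropLast.map some).zip
      ((nums.drop 1).map some ++ [none])) = (List.range nums.length).map (gTrip nums) := by
  apply List.ext_getElem
  · simp [List.length_zip, List.length_dropLast]
    omega
  · intro k h1 h2
    simp only [List.length_zip, List.length_cons, List.length_map, List.length_dropLast,
      List.length_append, List.length_drop, List.length_singleton] at h1
    have hk : k < nums.length := by omega
    rw [List.getElem_zip, List.getElem_zip, List.getElem_map, List.getElem_range]
    unfold gTrip
    refine Prod.ext ?_ (Prod.ext ?_ ?_)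
    · simp [List.getD_eq_getElem?_getD, List.getElem?_eq_getElem hk]
    · rcases Nat.eq_zero_or_pos k with hk0 | hk0
      · subst hk0; simp
      · have : k - 1 < nums.dropLast.length := by simp [List.length_dropLast]; omega
        rw [List.getElem_cons, dif_neg (by omega : ¬ k = 0), List.getElem_map,
          List.getElem_dropLast]
        simp [if_neg (by omega : ¬ k = 0),
          List.getD_eq_getElem?_getD, List.getElem?_eq_getElem (by omega : k - 1 < nums.length)]
    · by_cases hk1 : k + 1 < nums.length
      · have hlt : k < ((nums.drop 1).map some).length := by simp; omega
        rw [List.getElem_append_left hlt, List.getElem_map, List.getElem_drop]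
        simp [hk1, List.getD_eq_getElem?_getD,
          List.getElem?_eq_getElem (by omega : 1 + k < nums.length), Nat.add_comm]
      · have hge : ((nums.drop 1).map some).length ≤ k := by simp; omega
        rw [List.getElem_append_right hge]
        simp [hk1]

lemma tripleCost_eq (nums : List Int) (i : Nat) (hi : i < nums.length) :
    tripleCost (gTrip nums i).1 (gTrip nums i).2.1 (gTrip nums i).2.2 = costB nums (i : Int) := by
  have e0 : PySem.List.pyGetD nums (i : Int) 0 = nums.getD i 0 := PySem.List.pyGetD_natCast nums i 0
  have e2 : PySem.List.pyGetD nums ((i : Int) + 1) 0 = nums.getD (i+1) 0 := by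
    rw [show (i : Int) + 1 = ((i+1 : Nat) : Int) by omega, PySem.List.pyGetD_natCast]
  unfold gTrip tripleCost costB
  dsimp only
  rw [e0, e2]
  by_cases h0 : i = 0
  · subst h0
    split_ifs <;>
      first
        | omega
        | (simp [PySem.List.min?] <;> (try split_ifs) <;> (try simp) <;> omega)
  · have e1 : PySem.List.pyGetD nums ((i : Int) - 1) 0 = nums.getD (i-1) 0 := by
      rw [show (i : Int) - 1 = ((i-1 : Nat) : Int) by omega, PySem.List.pyGetD_natCast]
    rw [e1]
    split_ifs <;>
      first
        | omega
        | (simp [PySem.List.min?] <;> (try split_ifs) <;> (try simp) <;> omega)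

-- alternating partial sums
def Esum (nums : List Int) (a : Int) (n : Nat) : Int :=
  ((PySem.List.pyRange a (n : Int) 2).map (costB nums)).sum

lemma foldTrip (nums : List Int) : ∀ (n : Nat), n ≤ nums.length →
    ((List.range n).map (gTrip nums)).foldl
        (fun st t => (st.2, st.1 + tripleCost t.1 t.2.1 t.2.2)) ((0:Int), (0:Int))
      = if n % 2 = 0 then (Esum nums 0 n, Esum nums 1 n) else (Esum nums 1 n, Esum nums 0 n)
  | 0, _ => by
      simp [Esum, pyRange_two_nil 0 0 (by omega), pyRange_two_nil 1 0 (by omega)]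
  | n+1, hn => by
      rw [List.range_succ, List.map_append, List.foldl_append,
        foldTrip nums n (by omega)]
      simp only [List.map_cons, List.map_nil, List.foldl_cons, List.foldl_nil]
      have hc := tripleCost_eq nums n (by omega)
      have hcast : ((n+1 : Nat) : Int) = (n : Int) + 1 := by push_cast; ring
      by_cases hp : n % 2 = 0
      · have hE : Esum nums 0 (n+1) = Esum nums 0 n + costB nums (n : Int) := by
          unfold Esum
          rw [hcast, pyRange_two_snoc 0 (n : Int) (by omega) (by omega)]
          simp
        have hO : Esum nums 1 (n+1) = Esum nums 1 n := by
          unfold Esum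
          rw [hcast, pyRange_two_stay 1 (n : Int) (by omega)]
        rw [if_pos hp, if_neg (by omega : ¬ (n+1) % 2 = 0), hE, hO, hc]
      · have hE : Esum nums 0 (n+1) = Esum nums 0 n := by
          unfold Esum
          rw [hcast, pyRange_two_stay 0 (n : Int) (by omega)]
        have hO : Esum nums 1 (n+1) = Esum nums 1 n + costB nums (n : Int) := by
          unfold Esum
          rw [hcast, pyRange_two_snoc 1 (n : Int) (by omega) (by omega)]
          simp
        rw [if_neg hp, if_pos (by omega : (n+1) % 2 = 0), hE, hO, hc]

-- ===== VERDICT (by name: the statement is the Claim_ definition above) =====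
theorem solution_769_4_1_spec : Claim_equal_solution_769_4_1 := by
  intro nums _
  unfold Spec_solution_769_4_1 solution_769_4_1 solution_769_4_1_alt
  dsimp only
  rw [innerA_eq 0 nums (by norm_num), innerA_eq 1 nums (by norm_num)]
  rw [triples_eq nums, foldTrip nums nums.length le_rfl]
  by_cases hp : nums.length % 2 = 0
  · rw [if_pos hp]
    rfl
  · rw [if_neg hp]
    exact min_comm _ _
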